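-- pv_equiv track=rewrite | github.com/ShrikeBin/Uni4 | AI/list3/myBot/bot.py | checkIfWinCondition
-- ===== SOURCE A (Python) =====
-- BOARD_SIZE = 5;
--
-- def checkIfWinCondition(board, playerSymbol):
--     def isFourInLine(segment):
--         return segment.count(playerSymbol) == 4
--
--     # Check rows
--     for i in range(BOARD_SIZE):
--         for j in range(BOARD_SIZE - 3):
--             segment = [board[i][j + k] for k in range(4)]
--             if isFourInLine(segment):
--                 return True
--
--     # Check columns
--     for j in range(BOARD_SIZE):
--         for i in range(BOARD_SIZE - 3):
--             segment = [board[i + k][j] for k in range(4)]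
--             if isFourInLine(segment):
--                 return True
--
--     # Check diagonals (top-left to bottom-right)
--     for i in range(BOARD_SIZE - 3):
--         for j in range(BOARD_SIZE - 3):
--             segment = [board[i + k][j + k] for k in range(4)]
--             if isFourInLine(segment):
--                 return True
--
--     # Check diagonals (top-right to bottom-left)
--     for i in range(BOARD_SIZE - 3):
--         for j in range(3, BOARD_SIZE):
--             segment = [board[i + k][j - k] for k in range(4)]
--             if isFourInLine(segment):
--                 return True
--
--     return False
-- ===== SOURCE B (Python) =====
-- BOARD_SIZE = 5
--
-- def checkIfWinCondition(board, playerSymbol):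
--     # Collect every maximal line of the 5x5 board (rows, columns, both diagonal
--     # families with length >= 4), then run-scan each line with a counter.
--     lines = []
--     for i in range(BOARD_SIZE):
--         lines.append([board[i][j] for j in range(BOARD_SIZE)])
--     for j in range(BOARD_SIZE):
--         lines.append([board[i][j] for i in range(BOARD_SIZE)])
--     for d in range(-1, 2):
--         lines.append([board[i][i + d] for i in range(BOARD_SIZE) if 0 <= i + d < BOARD_SIZE])
--     for s in range(3, 6):
--         lines.append([board[i][s - i] for i in range(BOARD_SIZE) if 0 <= s - i < BOARD_SIZE])
--     for line in lines:
--         run = 0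
--         for cell in line:
--             run = run + 1 if cell == playerSymbol else 0
--             if run >= 4:
--                 return True
--     return False
-- ===== Notes on version B (the rewrite author's own statement) =====
-- stated objective: alternative
-- what changed: B replaces A's fixed 4-cell window extraction (count==4 per window) with collecting every maximal line of the board (rows, columns, length->=4 diagonals) and run-scanning each line with a counter that resets on a mismatch and wins at 4. Pre_ excludes boards whose first five rows are not all present with five cells, on which A raises IndexError unless a win is found before the first missing cell is read (B builds full lines eagerly and raises there).
-- outside the precondition, e.g. on checkIfWinCondition([['x', 'x', 'x', 'x']], 'x'): A returns True, B raises IndexError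
import Mathlib
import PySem

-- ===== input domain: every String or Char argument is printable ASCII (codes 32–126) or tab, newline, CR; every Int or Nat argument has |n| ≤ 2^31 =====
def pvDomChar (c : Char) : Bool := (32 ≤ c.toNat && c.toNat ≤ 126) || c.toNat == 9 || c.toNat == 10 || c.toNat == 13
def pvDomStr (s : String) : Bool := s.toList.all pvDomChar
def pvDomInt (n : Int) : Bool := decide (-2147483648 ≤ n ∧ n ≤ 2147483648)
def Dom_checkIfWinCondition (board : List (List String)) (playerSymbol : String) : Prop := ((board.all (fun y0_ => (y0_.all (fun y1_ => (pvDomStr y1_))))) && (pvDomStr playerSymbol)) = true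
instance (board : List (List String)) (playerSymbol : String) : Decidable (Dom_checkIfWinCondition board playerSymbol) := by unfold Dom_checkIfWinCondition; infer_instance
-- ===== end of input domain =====

-- B scans each maximal line (rows, columns, length-≥4 diagonals) with a running counter
-- instead of extracting fixed 4-cell windows; same return value on 5×5 boards (alternative decomposition).

-- board[i][j], total form; Pre_ guarantees the accesses both Pythons make are in range.
def pvCell (board : List (List String)) (i j : Int) : String :=
  PySem.List.pyGetD (PySem.List.pyGetD board i []) j ""

-- ===== PORT A =====
def checkIfWinCondition (board : List (List String)) (playerSymbol : String) : Bool :=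
  -- isFourInLine(segment) = segment.count(playerSymbol) == 4
  let isFour : List String → Bool := fun seg => PySem.List.count seg playerSymbol == (4 : Int)
  -- rows
  ((PySem.List.pyRange 0 5 1).any fun i => (PySem.List.pyRange 0 2 1).any fun j =>
    isFour ((PySem.List.pyRange 0 4 1).map fun k => pvCell board i (j + k)))
  -- columns
  || ((PySem.List.pyRange 0 5 1).any fun j => (PySem.List.pyRange 0 2 1).any fun i =>
    isFour ((PySem.List.pyRange 0 4 1).map fun k => pvCell board (i + k) j))
  -- diagonals (top-left to bottom-right)
  || ((PySem.List.pyRange 0 2 1).any fun i => (PySem.List.pyRange 0 2 1).any fun j =>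
    isFour ((PySem.List.pyRange 0 4 1).map fun k => pvCell board (i + k) (j + k)))
  -- diagonals (top-right to bottom-left)
  || ((PySem.List.pyRange 0 2 1).any fun i => (PySem.List.pyRange 3 5 1).any fun j =>
    isFour ((PySem.List.pyRange 0 4 1).map fun k => pvCell board (i + k) (j - k)))

-- ===== PORT B =====
-- run-scan of one line: counter resets on a mismatch, True as soon as it reaches 4
def pvRun (playerSymbol : String) (line : List String) : Bool :=
  (line.foldl (fun st c =>
    if st.2 then st
    else
      let run : Int := if c == playerSymbol then st.1 + 1 else 0
      (run, decide (4 ≤ run))) ((0 : Int), false)).2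

def checkIfWinCondition_alt (board : List (List String)) (playerSymbol : String) : Bool :=
  let lines : List (List String) :=
    ((PySem.List.pyRange 0 5 1).map fun i => (PySem.List.pyRange 0 5 1).map fun j => pvCell board i j)
    ++ ((PySem.List.pyRange 0 5 1).map fun j => (PySem.List.pyRange 0 5 1).map fun i => pvCell board i j)
    ++ ((PySem.List.pyRange (-1) 2 1).map fun d =>
         (((PySem.List.pyRange 0 5 1).filter fun i => decide (0 ≤ i + d) && decide (i + d < 5)).map
           fun i => pvCell board i (i + d)))
    ++ ((PySem.List.pyRange 3 6 1).map fun s =>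
         (((PySem.List.pyRange 0 5 1).filter fun i => decide (0 ≤ s - i) && decide (s - i < 5)).map
           fun i => pvCell board i (s - i)))
  lines.any (pvRun playerSymbol)

-- ===== PRECONDITION & SPEC =====
-- Pre_ excludes boards that are not at least 5×5 in their first five rows: there A raises
-- IndexError except when a win happens to be found before the first missing cell is read.
def Pre_checkIfWinCondition (board : List (List String)) (playerSymbol : String) : Prop :=
  5 ≤ board.length ∧ ∀ r ∈ board.take 5, 5 ≤ r.length
instance (board : List (List String)) (playerSymbol : String) : Decidable (Pre_checkIfWinCondition board playerSymbol) := by unfold Pre_checkIfWinCondition; infer_instance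

def pvWitness_checkIfWinCondition : List (List String) × String :=
  ([["x","o","x","o","x"],["o","x","o","x","o"],["x","o","x","o","x"],["o","x","o","x","o"],["x","o","x","o","x"]], "x")

def Spec_checkIfWinCondition (board : List (List String)) (playerSymbol : String) (out : Bool) : Prop := out = checkIfWinCondition_alt board playerSymbol
instance (board : List (List String)) (playerSymbol : String) (out : Bool) : Decidable (Spec_checkIfWinCondition board playerSymbol out) := by unfold Spec_checkIfWinCondition; infer_instance

-- ===== CLAIM (what is proved, stated in full; the proofs are below) =====
def Claim_equal_checkIfWinCondition : Prop := ∀ (board : List (List String)) (playerSymbol : String), Dom_checkIfWinCondition board playerSymbol → Pre_checkIfWinCondition board playerSymbol → Spec_checkIfWinCondition board playerSymbol (checkIfWinCondition board playerSymbol)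

-- ===== LEMMAS AND PROOFS =====

lemma pv_exists5 {α : Type} (l : List α) (h : 5 ≤ l.length) :
    ∃ a b c d e t, l = a :: b :: c :: d :: e :: t := by
  match l, h with
  | a :: b :: c :: d :: e :: t, _ => exact ⟨a, b, c, d, e, t, rfl⟩

lemma pv_count4 (ps a b c d : String) :
    (((List.count ps [a, b, c, d] : Nat) : Int) == (4 : Int)) =
      ((a == ps) && (b == ps) && (c == ps) && (d == ps)) := by
  cases ha : a == ps <;> cases hb : b == ps <;> cases hc : c == ps <;> cases hd : d == ps <;>
    simp [List.count_cons, List.count_nil, ha, hb, hc, hd]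

lemma pv_run5 (ps a b c d e : String) :
    pvRun ps [a, b, c, d, e] =
      ((a == ps) && (b == ps) && (c == ps) && (d == ps)
        || (b == ps) && (c == ps) && (d == ps) && (e == ps)) := by
  cases ha : a == ps <;> cases hb : b == ps <;> cases hc : c == ps <;> cases hd : d == ps <;>
    cases he : e == ps <;> simp [pvRun, List.foldl, ha, hb, hc, hd, he]

lemma pv_run4 (ps a b c d : String) :
    pvRun ps [a, b, c, d] =
      ((a == ps) && (b == ps) && (c == ps) && (d == ps)) := by
  cases ha : a == ps <;> cases hb : b == ps <;> cases hc : c == ps <;> cases hd : d == ps <;>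
    simp [pvRun, List.foldl, ha, hb, hc, hd]

-- A's top-left-to-bottom-right diagonal windows come window-grid-order (0,0),(0,1),(1,0),(1,1);
-- B's line scan visits them as (1,0),(0,0),(1,1),(0,1): pure Boolean reordering of the same atoms.
lemma pv_d1 (x y z w : Bool) : (x || y || (z || w)) = (z || (x || (w || y))) := by cases x <;> cases y <;> cases z <;> cases w <;> decide

-- ===== VERDICT (by name: the statement is the Claim_ definition above) =====
set_option maxHeartbeats 2000000 in
theorem checkIfWinCondition_spec : Claim_equal_checkIfWinCondition := by
  intro board ps _ hpre
  obtain ⟨hlen, hrows⟩ := hpre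
  obtain ⟨r0, r1, r2, r3, r4, t, rfl⟩ := pv_exists5 board hlen
  obtain ⟨a00, a01, a02, a03, a04, t0, rfl⟩ := pv_exists5 r0 (hrows _ (by simp))
  obtain ⟨a10, a11, a12, a13, a14, t1, rfl⟩ := pv_exists5 r1 (hrows _ (by simp))
  obtain ⟨a20, a21, a22, a23, a24, t2, rfl⟩ := pv_exists5 r2 (hrows _ (by simp))
  obtain ⟨a30, a31, a32, a33, a34, t3, rfl⟩ := pv_exists5 r3 (hrows _ (by simp))
  obtain ⟨a40, a41, a42, a43, a44, t4, rfl⟩ := pv_exists5 r4 (hrows _ (by simp))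
  show Spec_checkIfWinCondition _ _ _
  unfold Spec_checkIfWinCondition checkIfWinCondition checkIfWinCondition_alt
  have hr5 : PySem.List.pyRange 0 5 1 = [0, 1, 2, 3, 4] := by decide
  have hr2 : PySem.List.pyRange 0 2 1 = [0, 1] := by decide
  have hr4 : PySem.List.pyRange 0 4 1 = [0, 1, 2, 3] := by decide
  have hrd : PySem.List.pyRange (-1) 2 1 = [-1, 0, 1] := by decide
  have hrs : PySem.List.pyRange 3 6 1 = [3, 4, 5] := by decide
  have hrj : PySem.List.pyRange 3 5 1 = [3, 4] := by decide
  simp only [hr5, hr2, hr4, hrd, hrs, hrj]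
  norm_num [pvCell, PySem.List.pyGetD_ofNat', PySem.List.pyGetD_zero_cons, List.getD,
    pv_count4, pv_run5, pv_run4, List.filter_cons, List.filter_nil]
  rw [pv_d1 (a00 == ps && a11 == ps && a22 == ps && a33 == ps)
        (a01 == ps && a12 == ps && a23 == ps && a34 == ps)
        (a10 == ps && a21 == ps && a32 == ps && a43 == ps)
        (a11 == ps && a22 == ps && a33 == ps && a44 == ps)]
  simp only [Bool.or_assoc]
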